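-- pv_equiv track=rewrite | github.com/s0nnarr/py-practice | homework2/hw2.py | functie_obiectiv
-- ===== SOURCE A (Python) =====
-- def functie_obiectiv(p):
--     n = len(p)
--     count = 0
--     for i in range(n):
--         for j in range(i + 1, n):
--             if p[i] == j + 1 and p[j] == i + 1:
--                 count += 1
--     return count
-- ===== SOURCE B (Python) =====
-- def functie_obiectiv(p):
--     # O(n): p[i] == j + 1 forces the unique partner j = v - 1; count matches in one pass.
--     n = len(p)
--     return sum(1 for i, v in enumerate(p) if i < v - 1 < n and p[v - 1] == i + 1)
-- ===== Notes on version B (the rewrite author's own statement) =====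
-- stated objective: faster
-- what changed: Replaced the nested all-pairs scan by a single generator-sum over enumerate(p): p[i] == j+1 forces the unique candidate partner j = p[i]-1, which is bounds-checked and verified directly.
import Mathlib
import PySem

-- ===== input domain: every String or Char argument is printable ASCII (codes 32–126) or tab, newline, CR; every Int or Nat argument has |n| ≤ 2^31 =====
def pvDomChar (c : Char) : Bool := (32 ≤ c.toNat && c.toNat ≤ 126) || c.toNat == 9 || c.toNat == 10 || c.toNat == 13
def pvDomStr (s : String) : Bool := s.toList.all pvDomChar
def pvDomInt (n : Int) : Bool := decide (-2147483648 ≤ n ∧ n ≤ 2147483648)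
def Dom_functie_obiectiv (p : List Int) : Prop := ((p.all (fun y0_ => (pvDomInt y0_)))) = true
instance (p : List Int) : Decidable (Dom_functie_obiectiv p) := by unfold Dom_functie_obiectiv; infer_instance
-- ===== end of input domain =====

-- B replaces A's O(n^2) pair scan by one pass over enumerate(p) counting the forced partner j = p[i]-1.

-- ===== PORT A =====
def functie_obiectiv (p : List Int) : Int :=
  let n : Int := p.length
  (PySem.List.pyRange 0 n 1).foldl (fun count i =>
    (PySem.List.pyRange (i + 1) n 1).foldl (fun count j =>
      if PySem.List.pyGetD p i 0 = j + 1 ∧ PySem.List.pyGetD p j 0 = i + 1 then count + 1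
      else count) count) 0

-- ===== PORT B =====
def functie_obiectiv_alt (p : List Int) : Int :=
  let n : Int := p.length
  ((PySem.List.enumerate p).countP (fun iv =>
    decide (iv.1 < iv.2 - 1 ∧ iv.2 - 1 < n ∧ PySem.List.pyGetD p (iv.2 - 1) 0 = iv.1 + 1)) : Int)

-- ===== PRECONDITION & SPEC =====
def Spec_functie_obiectiv (p : List Int) (out : Int) : Prop := out = functie_obiectiv_alt p
instance (p : List Int) (out : Int) : Decidable (Spec_functie_obiectiv p out) := by unfold Spec_functie_obiectiv; infer_instance

-- ===== CLAIM (what is proved, stated in full; the proofs are below) =====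
def Claim_equal_functie_obiectiv : Prop := ∀ (p : List Int), Dom_functie_obiectiv p → Spec_functie_obiectiv p (functie_obiectiv p)

-- ===== LEMMAS AND PROOFS =====

-- countP of a predicate that can hold only at v, on a duplicate-free list
theorem pv_countP_unique {l : List Int} (hnd : l.Nodup) (q : Int → Bool) (v : Int)
    (hv : ∀ x, q x = true → x = v) :
    l.countP q = if v ∈ l ∧ q v = true then 1 else 0 := by
  induction l with
  | nil => simp
  | cons a t ih =>
    rcases List.nodup_cons.mp hnd with ⟨ha, ht⟩
    rw [List.countP_cons]
    by_cases hqa : q a = true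
    · have hav : a = v := hv a hqa
      subst hav
      have h0 : t.countP q = 0 := by
        rw [List.countP_eq_zero]
        intro x hx hqx
        exact ha ((hv x hqx) ▸ hx)
      simp [h0, hqa]
    · have h0 : (if q a = true then 1 else 0) = 0 := by simp [hqa]
      rw [h0, ih ht]
      by_cases hqv : q v = true
      · have hva : v ≠ a := fun h => hqa (h ▸ hqv)
        simp [List.mem_cons, hva, hqv]
      · simp [hqv]

-- per-index: A's inner scan counts exactly the forced-partner check at index i
theorem pv_inner (p : List Int) (n i : Int) (hn : n = (p.length : Int)) :
    ((PySem.List.pyRange (i + 1) n 1).countP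
      (fun j => decide (PySem.List.pyGetD p i 0 = j + 1 ∧ PySem.List.pyGetD p j 0 = i + 1)) : Int)
    = (if i < PySem.List.pyGetD p i 0 - 1 ∧ PySem.List.pyGetD p i 0 - 1 < n ∧
          PySem.List.pyGetD p (PySem.List.pyGetD p i 0 - 1) 0 = i + 1 then 1 else 0) := by
  set v := PySem.List.pyGetD p i 0 - 1 with hvdef
  rw [pv_countP_unique (PySem.List.nodup_pyRange_one _ _)
      _ v (by intro x hx; simp at hx; omega)]
  by_cases h1 : i < v
  · by_cases h2 : v < n
    · have hmem : v ∈ PySem.List.pyRange (i + 1) n 1 := by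
        rw [PySem.List.mem_pyRange_one]; omega
      by_cases h3 : PySem.List.pyGetD p v 0 = i + 1
      · simp only [hmem, h1, h2, h3]
        simp
        omega
      · simp [hmem, h1, h2, h3]
    · have : v ∉ PySem.List.pyRange (i + 1) n 1 := by
        rw [PySem.List.mem_pyRange_one]; omega
      simp [this, h2]
  · have : v ∉ PySem.List.pyRange (i + 1) n 1 := by
      rw [PySem.List.mem_pyRange_one]; omega
    simp [this, h1]

-- ===== VERDICT (by name: the statement is the Claim_ definition above) =====
theorem functie_obiectiv_spec : Claim_equal_functie_obiectiv := by
  intro p _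
  unfold Spec_functie_obiectiv functie_obiectiv functie_obiectiv_alt
  dsimp only
  -- B side: enumerate p = (pyRange 0 n 1).map (fun j => (j, p[j]))
  rw [PySem.List.enumerate_eq_map_pyRange p 0, List.countP_map]
  -- A side: each outer step adds the forced-partner indicator for i
  have hA : ∀ (acc i : Int),
      (PySem.List.pyRange (i + 1) (p.length : Int) 1).foldl (fun count j =>
        if PySem.List.pyGetD p i 0 = j + 1 ∧ PySem.List.pyGetD p j 0 = i + 1 then count + 1
        else count) acc
      = (fun count i =>
          if i < PySem.List.pyGetD p i 0 - 1 ∧ PySem.List.pyGetD p i 0 - 1 < (p.length : Int) ∧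
             PySem.List.pyGetD p (PySem.List.pyGetD p i 0 - 1) 0 = i + 1 then count + 1
          else count) acc i := by
    intro acc i
    rw [PySem.List.foldl_ite_add_one, pv_inner p _ i rfl]
    dsimp only
    split_ifs <;> omega
  refine Eq.trans (PySem.List.foldl_congr_mem _ _
    (fun count i =>
      if i < PySem.List.pyGetD p i 0 - 1 ∧ PySem.List.pyGetD p i 0 - 1 < (p.length : Int) ∧
         PySem.List.pyGetD p (PySem.List.pyGetD p i 0 - 1) 0 = i + 1 then count + 1
      else count) 0 (fun acc i _ => hA acc i)) ?_
  rw [PySem.List.foldl_ite_add_one]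
  simp only [PySem.List.len, zero_add]
  rfl
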